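-- pv_equiv track=rewrite | github.com/dajuguan/AI | basic/flowers_data.py | _split_class_indices
-- ===== SOURCE A (Python) =====
-- def _split_class_indices(indices: list[int]) -> tuple[list[int], list[int], list[int]]:
--     total = len(indices)
--     if total < 3:
--         raise ValueError(
--             "Each class needs at least 3 samples for train/val/test splits."
--         )
--
--     n_train = max(1, int(total * 0.8))
--     n_val = max(1, int(total * 0.1))
--     n_test = total - n_train - n_val
--
--     while n_test < 1:
--         if n_train >= n_val and n_train > 1:
--             n_train -= 1
--         elif n_val > 1:
--             n_val -= 1
--         else:
--             raise ValueError("Unable to allocate at least one test sample per class.")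
--         n_test = total - n_train - n_val
--
--     train_indices = indices[:n_train]
--     val_indices = indices[n_train : n_train + n_val]
--     test_indices = indices[n_train + n_val :]
--     return train_indices, val_indices, test_indices
-- ===== SOURCE B (Python) =====
-- def _split_class_indices(indices: list[int]) -> tuple[list[int], list[int], list[int]]:
--     total = len(indices)
--     if total < 3:
--         raise ValueError(
--             "Each class needs at least 3 samples for train/val/test splits."
--         )
--     n_train = max(1, int(total * 0.8))
--     n_val = max(1, int(total * 0.1))
--     # The combined floor sizes can overshoot total - 1 by at most 1, and only
--     # when n_train >= 2, so the whole shortfall comes out of n_train at once.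
--     n_train -= max(0, n_train + n_val - (total - 1))
--     cut = n_train + n_val
--     return indices[:n_train], indices[n_train:cut], indices[cut:]
-- ===== Notes on version B (the rewrite author's own statement) =====
-- stated objective: simpler
-- what changed: Replaces A's greedy while-loop that repeatedly decrements the split sizes by a single closed-form shortfall correction (the overshoot is at most 1 and always comes out of n_train), eliminating the loop and its unreachable inner raise.
import Mathlib
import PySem

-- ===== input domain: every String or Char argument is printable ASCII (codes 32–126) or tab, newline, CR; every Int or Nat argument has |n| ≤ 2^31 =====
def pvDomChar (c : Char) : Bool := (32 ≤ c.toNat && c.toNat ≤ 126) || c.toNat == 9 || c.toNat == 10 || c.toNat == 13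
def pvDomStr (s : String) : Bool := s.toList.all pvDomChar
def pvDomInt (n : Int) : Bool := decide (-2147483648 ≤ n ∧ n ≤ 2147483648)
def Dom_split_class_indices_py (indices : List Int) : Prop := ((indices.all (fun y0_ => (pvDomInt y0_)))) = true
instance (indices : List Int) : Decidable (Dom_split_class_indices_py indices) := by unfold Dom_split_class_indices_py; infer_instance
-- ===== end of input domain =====

-- B replaces A's greedy while-loop by a single arithmetic shortfall correction (objective: simpler).

-- ===== PORT A =====
-- int(total*0.8) / int(total*0.1): for the nonnegative totals a list length can take,
-- float multiplication then truncation equals floor division 4*t//5 resp. t//10 exactly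
-- (the rounding error of t*0.8 / t*0.1 is far below the distance to the next integer).
-- The while loop is ported with fuel a+b; each iteration lowers a+b by 1 and the loop
-- stops or raises before a+b reaches 2, so fuel (a+b).toNat is never exhausted;
-- 'none' models the ValueError raises (both are outside Pre_).
def splitLoopA : Nat → Int → Int → Int → Option (Int × Int)
  | 0, _, _, _ => none
  | fuel+1, total, a, b =>
    if total - a - b < 1 then
      if a ≥ b ∧ a > 1 then splitLoopA fuel total (a-1) b
      else if b > 1 then splitLoopA fuel total a (b-1)
      else none
    else some (a, b)

def split_class_indices_py (indices : List Int) : List Int × List Int × List Int :=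
  let total : Int := indices.length
  if total < 3 then ([], [], [])  -- ValueError, outside Pre_
  else
    let n_train := max 1 (PySem.Int.floordiv (4 * total) 5)
    let n_val := max 1 (PySem.Int.floordiv total 10)
    match splitLoopA (n_train.toNat + n_val.toNat) total n_train n_val with
    | none => ([], [], [])  -- ValueError, outside Pre_
    | some (a, b) =>
      (PySem.List.slice indices none (some a),
       PySem.List.slice indices (some a) (some (a + b)),
       PySem.List.slice indices (some (a + b)) none)

-- ===== PORT B =====
def split_class_indices_py_alt (indices : List Int) : List Int × List Int × List Int :=
  let total : Int := indices.length
  if total < 3 then ([], [], [])  -- ValueError, outside Pre_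
  else
    let n_train0 := max 1 (PySem.Int.floordiv (4 * total) 5)
    let n_val := max 1 (PySem.Int.floordiv total 10)
    let n_train := n_train0 - max 0 (n_train0 + n_val - (total - 1))
    let cut := n_train + n_val
    (PySem.List.slice indices none (some n_train),
     PySem.List.slice indices (some n_train) (some cut),
     PySem.List.slice indices (some cut) none)

-- ===== PRECONDITION & SPEC =====
-- A raises ValueError on lists with fewer than 3 elements; Pre_ excludes exactly those.
def Pre_split_class_indices_py (indices : List Int) : Prop := 3 ≤ indices.length
instance (indices : List Int) : Decidable (Pre_split_class_indices_py indices) := by unfold Pre_split_class_indices_py; infer_instance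
def pvWitness_split_class_indices_py : List Int := [1, 2, 3, 4]

def Spec_split_class_indices_py (indices : List Int) (out : List Int × List Int × List Int) : Prop := out = split_class_indices_py_alt indices
instance (indices : List Int) (out : List Int × List Int × List Int) : Decidable (Spec_split_class_indices_py indices out) := by unfold Spec_split_class_indices_py; infer_instance

-- ===== CLAIM (what is proved, stated in full; the proofs are below) =====
def Claim_equal_split_class_indices_py : Prop := ∀ (indices : List Int), Dom_split_class_indices_py indices → Pre_split_class_indices_py indices → Spec_split_class_indices_py indices (split_class_indices_py indices)

-- ===== LEMMAS AND PROOFS =====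

-- For total ≥ 6 there is no shortfall: total - n_train - n_val ≥ 1.
lemma no_shortfall (t : Int) (ht : 6 ≤ t) :
    1 ≤ t - max 1 (PySem.Int.floordiv (4 * t) 5) - max 1 (PySem.Int.floordiv t 10) := by
  rw [PySem.Int.floordiv_eq_ediv_of_pos (by omega), PySem.Int.floordiv_eq_ediv_of_pos (by omega)]
  omega

-- The loop agrees with the closed-form correction for every total ≥ 3.
lemma loop_eq_closed (t : Int) (ht : 3 ≤ t) :
    splitLoopA ((max 1 (PySem.Int.floordiv (4 * t) 5)).toNat + (max 1 (PySem.Int.floordiv t 10)).toNat)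
      t (max 1 (PySem.Int.floordiv (4 * t) 5)) (max 1 (PySem.Int.floordiv t 10))
    = some (max 1 (PySem.Int.floordiv (4 * t) 5)
              - max 0 (max 1 (PySem.Int.floordiv (4 * t) 5) + max 1 (PySem.Int.floordiv t 10) - (t - 1)),
            max 1 (PySem.Int.floordiv t 10)) := by
  rcases lt_or_ge t 6 with h6 | h6
  · -- t = 3, 4, 5 : concrete computations
    interval_cases t <;> decide
  · -- t ≥ 6 : the loop exits immediately and the shortfall is 0
    have h := no_shortfall t h6
    set a := max 1 (PySem.Int.floordiv (4 * t) 5) with ha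
    set b := max 1 (PySem.Int.floordiv t 10) with hb
    have ha1 : 1 ≤ a := le_max_left _ _
    have hb1 : 1 ≤ b := le_max_left _ _
    have hfuel : ∃ k, a.toNat + b.toNat = k + 1 := ⟨a.toNat + b.toNat - 1, by omega⟩
    obtain ⟨k, hk⟩ := hfuel
    rw [hk]
    simp only [splitLoopA]
    rw [if_neg (by omega)]
    congr 2
    omega

theorem split_class_indices_py_spec : Claim_equal_split_class_indices_py := by
  intro indices _ hpre
  unfold Spec_split_class_indices_py split_class_indices_py split_class_indices_py_alt
  have ht : (3 : Int) ≤ (indices.length : Int) := by exact_mod_cast hpre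
  simp only
  rw [if_neg (by omega), if_neg (by omega), loop_eq_closed _ ht]
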